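-- pv_equiv track=rewrite | github.com/idzia/checkpoint | music_reports.py | get_albums_by_genre
-- ===== SOURCE A (Python) =====
-- def get_albums_by_genre(albums, genre):
--     """
--     Get albums by genre
--
--     :param list albums: albums' data
--     :param str genre: genre to filter by
--
--
--     :returns: all albums of given genre
--     :rtype: list
--     """
--     genre_on_list = []
--     for i in range(len(albums)):
--         genre_on_list.append(albums[i][3])
--
--     if genre in genre_on_list:
--         albums_by_genre = []
--         for i in range(len(albums)):
--             if albums[i][3] == genre:
--                 albums_by_genre.append(albums[i])
--     else:
--         raise ValueError("Wrong genre type")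
--
--     return albums_by_genre
-- ===== SOURCE B (Python) =====
-- def get_albums_by_genre(albums, genre):
--     result = [a for a in albums if a[3] == genre]
--     if not result:
--         raise ValueError("Wrong genre type")
--     return result
-- ===== Notes on version B (the rewrite author's own statement) =====
-- stated objective: simpler
-- what changed: B filters in a single pass and derives genre presence from the filtered list being empty, removing A's separate genre-list construction and membership test.
import Mathlib
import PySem

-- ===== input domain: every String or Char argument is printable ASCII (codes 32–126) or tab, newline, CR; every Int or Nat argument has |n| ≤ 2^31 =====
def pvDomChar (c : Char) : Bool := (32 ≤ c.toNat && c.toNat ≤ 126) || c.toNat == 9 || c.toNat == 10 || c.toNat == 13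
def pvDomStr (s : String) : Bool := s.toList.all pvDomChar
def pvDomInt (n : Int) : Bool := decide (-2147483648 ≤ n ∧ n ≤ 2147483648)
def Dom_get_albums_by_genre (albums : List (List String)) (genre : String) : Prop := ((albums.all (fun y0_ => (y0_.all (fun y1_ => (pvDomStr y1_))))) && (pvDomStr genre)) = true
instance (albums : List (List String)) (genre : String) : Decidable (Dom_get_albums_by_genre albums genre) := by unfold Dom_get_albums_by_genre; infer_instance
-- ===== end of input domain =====

-- B filters in one pass and raises when the filtered list is empty, removing A's separate genre-list pass (objective: simpler).


-- ===== PORT A =====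
def get_albums_by_genre (albums : List (List String)) (genre : String) : List (List String) :=
  let genre_on_list :=
    (PySem.List.pyRange 0 albums.length 1).foldl
      (fun acc i => acc ++ [PySem.List.pyGetD (PySem.List.pyGetD albums i []) 3 ""]) []
  if genre ∈ genre_on_list then
    (PySem.List.pyRange 0 albums.length 1).foldl
      (fun acc i =>
        if PySem.List.pyGetD (PySem.List.pyGetD albums i []) 3 "" == genre
        then acc ++ [PySem.List.pyGetD albums i []] else acc) []
  else []  -- Python raises ValueError here; excluded by Pre_

-- ===== PORT B =====
def get_albums_by_genre_alt (albums : List (List String)) (genre : String) : List (List String) :=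
  let result := albums.filter (fun a => PySem.List.pyGetD a 3 "" == genre)
  if result = [] then []  -- Python raises ValueError here; excluded by Pre_
  else result

-- ===== PRECONDITION & SPEC =====
-- Pre_ excludes inputs where A raises: a row shorter than 4 (IndexError) or no album of the genre (ValueError).
def Pre_get_albums_by_genre (albums : List (List String)) (genre : String) : Prop :=
  (∀ a ∈ albums, 4 ≤ a.length) ∧ ∃ a ∈ albums, PySem.List.pyGetD a 3 "" = genre
instance (albums : List (List String)) (genre : String) : Decidable (Pre_get_albums_by_genre albums genre) := by unfold Pre_get_albums_by_genre; infer_instance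

def pvWitness_get_albums_by_genre : List (List String) × String :=
  ([["t", "artist", "2000", "rock"], ["u", "b", "1999", "pop"]], "rock")

def Spec_get_albums_by_genre (albums : List (List String)) (genre : String) (out : List (List String)) : Prop := out = get_albums_by_genre_alt albums genre
instance (albums : List (List String)) (genre : String) (out : List (List String)) : Decidable (Spec_get_albums_by_genre albums genre out) := by unfold Spec_get_albums_by_genre; infer_instance

-- ===== CLAIM (what is proved, stated in full; the proofs are below) =====
def Claim_equal_get_albums_by_genre : Prop := ∀ (albums : List (List String)) (genre : String), Dom_get_albums_by_genre albums genre → Pre_get_albums_by_genre albums genre → Spec_get_albums_by_genre albums genre (get_albums_by_genre albums genre)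

-- ===== LEMMAS AND PROOFS =====

theorem pvWitness_ok : Dom_get_albums_by_genre pvWitness_get_albums_by_genre.1 pvWitness_get_albums_by_genre.2 ∧ Pre_get_albums_by_genre pvWitness_get_albums_by_genre.1 pvWitness_get_albums_by_genre.2 := by
  constructor
  · decide
  · refine ⟨by decide, ⟨["t", "artist", "2000", "rock"], by decide⟩⟩

-- ===== VERDICT (by name: the statement is the Claim_ definition above) =====
theorem get_albums_by_genre_spec : Claim_equal_get_albums_by_genre := by
  intro albums genre _ hpre
  obtain ⟨_, a, ha, hg⟩ := hpre
  unfold Spec_get_albums_by_genre get_albums_by_genre get_albums_by_genre_alt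
  simp only [PySem.List.foldl_append_singleton_eq_map, List.nil_append]
  rw [show (fun i => PySem.List.pyGetD (PySem.List.pyGetD albums i ([] : List String)) 3 "") =
      ((fun a => PySem.List.pyGetD a 3 "") ∘ (fun i => PySem.List.pyGetD albums i [])) from rfl,
    ← List.map_map, PySem.List.map_pyGetD_pyRange_zero' albums ([] : List String),
    PySem.List.foldl_pyRange_zero_pyGetD' albums ([] : List String)
      (fun acc a => if PySem.List.pyGetD a 3 "" == genre then acc ++ [a] else acc) [],
    PySem.List.foldl_append_if_eq_filter (fun a => PySem.List.pyGetD a 3 "" == genre) albums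
      ([] : List (List String)), List.nil_append]
  have hmem : genre ∈ albums.map (fun a => PySem.List.pyGetD a 3 "") :=
    List.mem_map.mpr ⟨a, ha, hg⟩
  have hne : albums.filter (fun a => PySem.List.pyGetD a 3 "" == genre) ≠ [] := by
    intro h
    have : a ∈ albums.filter (fun a => PySem.List.pyGetD a 3 "" == genre) :=
      List.mem_filter.mpr ⟨ha, by simp [hg]⟩
    simp [h] at this
  simp [hmem, hne]
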